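-- pv_equiv track=rewrite | github.com/MigDroid/MigDroid | Planner/Planner.py | reorder_candidates
-- ===== SOURCE A (Python) =====
-- def reorder_candidates(candidates):
--     num_digit_text = sum(1 for c in candidates if c.get('text', '').isdigit())
--     num_digit_content_desc = sum(1 for c in candidates if c.get('content-desc', '').isdigit())
--     if num_digit_text < 4 and num_digit_content_desc < 4:
--         return candidates
--     if num_digit_text >= 4:
--         attr = 'text'
--     else:
--         attr = 'content-desc'
--     digit_candidates = []
--     non_digit_candidates = []
--     zero_candidates = []
--     for c in candidates:
--         text = c.get(attr, '')
--         if text.isdigit():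
--             digit = int(text)
--             if digit == 0:
--                 zero_candidates.append(c)
--             else:
--                 digit_candidates.append(c)
--         else:
--             non_digit_candidates.append(c)
--
--     digit_candidates_sorted = sorted(digit_candidates, key=lambda x: int(x[attr]))
--
--     max_index = max(int(c[attr]) for c in digit_candidates_sorted) - 1
--     new_length = max(len(candidates), max_index + 1)
--     new_candidates = [None] * new_length
--
--     used_indices = set()
--     for c in digit_candidates_sorted:
--         digit = int(c[attr])
--         idx = digit - 1
--         if 0 <= idx < new_length and idx not in used_indices:
--             new_candidates[idx] = c
--             used_indices.add(idx)
--
--     current = 0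
--     for i in range(new_length):
--         if new_candidates[i] is None and current < len(non_digit_candidates):
--             new_candidates[i] = non_digit_candidates[current]
--             current += 1
--
--     new_candidates += zero_candidates
--
--     new_candidates = [c for c in new_candidates if c is not None]
--     return new_candidates
-- ===== SOURCE B (Python) =====
-- def reorder_candidates(candidates):
--     num_digit_text = sum(1 for c in candidates if c.get('text', '').isdigit())
--     num_digit_content_desc = sum(1 for c in candidates if c.get('content-desc', '').isdigit())
--     if num_digit_text < 4 and num_digit_content_desc < 4:
--         return candidates
--     attr = 'text' if num_digit_text >= 4 else 'content-desc'
--     slot = {}           # idx -> first candidate claiming that slot (original order)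
--     non_digit = []
--     zeros = []
--     max_digit = 0
--     for c in candidates:
--         text = c.get(attr, '')
--         if text.isdigit():
--             d = int(text)
--             if d == 0:
--                 zeros.append(c)
--             else:
--                 if d > max_digit:
--                     max_digit = d
--                 slot.setdefault(d - 1, c)
--         else:
--             non_digit.append(c)
--     n = max(len(candidates), max_digit)
--     out = []
--     j = 0
--     for i in range(n):
--         if i in slot:
--             out.append(slot[i])
--         elif j < len(non_digit):
--             out.append(non_digit[j])
--             j += 1
--     out.extend(zeros)
--     return out
-- ===== Notes on version B (the rewrite author's own statement) =====
-- stated objective: alternative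
-- what changed: B removes A's stable sort and the None-array/used-set/fill passes: a single pass builds a first-wins slot dictionary keyed by digit-1 plus the non-digit, zero and running-max accumulators, and a second pass streams the output directly (no sort, no Option-array rewriting/filtering); same measured cost on the generated inputs.
-- crash fix: When at least 4 candidates carry digit labels on the chosen attribute but all those labels are '0', A raises ValueError (max() of an empty sequence); B returns the non-digit candidates followed by the zero-labelled ones. — e.g. on reorder_candidates([[("text", "0")], [("text", "0")], [("text", "0")], [("text", "0")]]): A raises ValueError, B returns [[("text", "0")], [("text", "0")], [("text", "0")], [("text", "0")]]
import Mathlib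
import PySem

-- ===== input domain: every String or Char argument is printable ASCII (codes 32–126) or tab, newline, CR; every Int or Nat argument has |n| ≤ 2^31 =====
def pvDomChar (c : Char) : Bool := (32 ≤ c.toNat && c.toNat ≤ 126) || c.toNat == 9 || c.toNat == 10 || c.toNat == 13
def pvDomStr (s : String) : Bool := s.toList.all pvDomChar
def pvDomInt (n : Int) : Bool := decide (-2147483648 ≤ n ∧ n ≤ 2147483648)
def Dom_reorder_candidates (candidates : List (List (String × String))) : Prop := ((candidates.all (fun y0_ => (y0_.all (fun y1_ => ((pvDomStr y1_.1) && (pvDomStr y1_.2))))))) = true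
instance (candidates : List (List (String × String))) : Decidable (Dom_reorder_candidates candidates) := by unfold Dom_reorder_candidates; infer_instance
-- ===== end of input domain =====

-- B drops A's stable sort and the None-array/used-set/fill passes: one pass builds a
-- first-wins slot dictionary, a second streams the output directly.
-- Pre_ excludes only the inputs where A raises ValueError (max() of an empty sequence):
-- ≥ 4 digit labels on the chosen attribute but every one of them equal to 0.

-- the digit value of a candidate's attribute: int(c.get(attr, '')); both Pythons compute it
-- this way only on strings with .isdigit() true, where int() cannot raise
def pvVal (attr : String) (c : List (String × String)) : Int :=
  (PySem.Int.ofStr? (PySem.Dict.getD ⟨c⟩ attr "")).getD 0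

def pvDig (attr : String) (c : List (String × String)) : Bool :=
  PySem.Str.strIsdigit (PySem.Dict.getD ⟨c⟩ attr "")

-- ===== PORT A =====
def reorder_candidates (candidates : List (List (String × String))) : List (List (String × String)) :=
  let num_digit_text : Int :=
    candidates.foldl (fun acc c => if pvDig "text" c then acc + 1 else acc) 0
  let num_digit_content_desc : Int :=
    candidates.foldl (fun acc c => if pvDig "content-desc" c then acc + 1 else acc) 0
  if num_digit_text < 4 ∧ num_digit_content_desc < 4 then candidates else
  let attr := if num_digit_text ≥ 4 then "text" else "content-desc"
  -- the three appending accumulators of A's classification loop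
  let part := candidates.foldl
    (fun (s : List (List (String × String)) × List (List (String × String)) × List (List (String × String))) c =>
      if pvDig attr c then
        if pvVal attr c = 0 then (s.1, s.2.1, s.2.2 ++ [c])
        else (s.1 ++ [c], s.2.1, s.2.2)
      else (s.1, s.2.1 ++ [c], s.2.2)) ([], [], [])
  let digit_candidates := part.1
  let non_digit_candidates := part.2.1
  let zero_candidates := part.2.2
  let dsorted := PySem.List.sorted digit_candidates (pvVal attr) false
  -- max(...) over an empty sequence raises ValueError: excluded by Pre_, .getD 0 unreachable there
  let max_index := (PySem.List.max? (dsorted.map (pvVal attr)) (fun v => v)).getD 0 - 1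
  let new_length := max (candidates.length : Int) (max_index + 1)
  let st := dsorted.foldl
    (fun (s : List (Option (List (String × String))) × PySem.Set Int) c =>
      if 0 ≤ pvVal attr c - 1 ∧ pvVal attr c - 1 < new_length ∧ pvVal attr c - 1 ∉ s.2 then
        (PySem.List.pySetD s.1 (pvVal attr c - 1) (some c), PySem.Set.add s.2 (pvVal attr c - 1))
      else s)
    (List.replicate new_length.toNat none, PySem.Set.empty)
  let fill := (PySem.List.pyRange 0 new_length 1).foldl
    (fun (s : List (Option (List (String × String))) × Int) i =>
      if PySem.List.pyGetD s.1 i none = none ∧ s.2 < (non_digit_candidates.length : Int) then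
        (PySem.List.pySetD s.1 i (some (PySem.List.pyGetD non_digit_candidates s.2 [])), s.2 + 1)
      else s) (st.1, 0)
  (fill.1 ++ zero_candidates.map some).filterMap id

-- ===== PORT B =====
def reorder_candidates_alt (candidates : List (List (String × String))) : List (List (String × String)) :=
  let num_digit_text : Int := (candidates.countP (pvDig "text") : Nat)
  let num_digit_content_desc : Int := (candidates.countP (pvDig "content-desc") : Nat)
  if num_digit_text < 4 ∧ num_digit_content_desc < 4 then candidates else
  let attr := if num_digit_text ≥ 4 then "text" else "content-desc"
  -- one pass: slot dictionary (setdefault = first wins), non-digit list, zero list, running max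
  let st := candidates.foldl
    (fun (s : PySem.Dict Int (List (String × String)) × List (List (String × String)) × List (List (String × String)) × Int) c =>
      if pvDig attr c then
        if pvVal attr c = 0 then (s.1, s.2.1, s.2.2.1 ++ [c], s.2.2.2)
        else (s.1.setdefault (pvVal attr c - 1) c, s.2.1, s.2.2.1,
              if pvVal attr c > s.2.2.2 then pvVal attr c else s.2.2.2)
      else (s.1, s.2.1 ++ [c], s.2.2.1, s.2.2.2))
    (PySem.Dict.empty, [], [], 0)
  let slot := st.1
  let non_digit := st.2.1
  let zeros := st.2.2.1
  let max_digit := st.2.2.2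
  let n := max (candidates.length : Int) max_digit
  let fin := (PySem.List.pyRange 0 n 1).foldl
    (fun (s : List (List (String × String)) × Int) i =>
      if slot.contains i then (s.1 ++ [slot.getD i []], s.2)
      else if s.2 < (non_digit.length : Int) then
        (s.1 ++ [PySem.List.pyGetD non_digit s.2 []], s.2 + 1)
      else s) ([], 0)
  fin.1 ++ zeros

-- ===== PRECONDITION & SPEC =====
-- Pre_ excludes exactly the inputs where A raises ValueError (max() of an empty sequence):
-- at least 4 digit labels on the chosen attribute but none of them with a nonzero value.
def Pre_reorder_candidates (candidates : List (List (String × String))) : Prop :=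
  (candidates.countP (pvDig "text") < 4 ∧ candidates.countP (pvDig "content-desc") < 4) ∨
  (∃ c ∈ candidates,
     pvDig (if 4 ≤ candidates.countP (pvDig "text") then "text" else "content-desc") c = true ∧
     pvVal (if 4 ≤ candidates.countP (pvDig "text") then "text" else "content-desc") c ≠ 0)
instance (candidates : List (List (String × String))) : Decidable (Pre_reorder_candidates candidates) := by
  unfold Pre_reorder_candidates; infer_instance

def pvWitness_reorder_candidates : (List (List (String × String))) := []

-- A raises ValueError (max() of an empty sequence) when ≥ 4 candidates carry digit labels on the
-- chosen attribute but all those labels are '0'; B returns the non-digit candidates followed by the zeros.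
def Raises_reorder_candidates (candidates : List (List (String × String))) : Prop :=
  ¬ (candidates.countP (pvDig "text") < 4 ∧ candidates.countP (pvDig "content-desc") < 4) ∧
  (∀ c ∈ candidates,
     pvDig (if 4 ≤ candidates.countP (pvDig "text") then "text" else "content-desc") c = true →
     pvVal (if 4 ≤ candidates.countP (pvDig "text") then "text" else "content-desc") c = 0)
instance (candidates : List (List (String × String))) : Decidable (Raises_reorder_candidates candidates) := by
  unfold Raises_reorder_candidates; infer_instance

def pvRaiseWitness_reorder_candidates : (List (List (String × String))) :=
  [[("text", "0")], [("text", "0")], [("text", "0")], [("text", "0")]]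
def pvRaiseWitnessOut_reorder_candidates : List (List (String × String)) :=
  [[("text", "0")], [("text", "0")], [("text", "0")], [("text", "0")]]

def Spec_reorder_candidates (candidates : List (List (String × String))) (out : List (List (String × String))) : Prop := out = reorder_candidates_alt candidates
instance (candidates : List (List (String × String))) (out : List (List (String × String))) : Decidable (Spec_reorder_candidates candidates out) := by unfold Spec_reorder_candidates; infer_instance

-- ===== CLAIM (what is proved, stated in full; the proofs are below) =====
def Claim_equal_reorder_candidates : Prop := ∀ (candidates : List (List (String × String))), Dom_reorder_candidates candidates → Pre_reorder_candidates candidates → Spec_reorder_candidates candidates (reorder_candidates candidates)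
def Claim_raises_reorder_candidates : Prop := (∀ (candidates : List (List (String × String))), Dom_reorder_candidates candidates → Raises_reorder_candidates candidates → ¬ Pre_reorder_candidates candidates) ∧ (Dom_reorder_candidates (pvRaiseWitness_reorder_candidates) ∧ Raises_reorder_candidates (pvRaiseWitness_reorder_candidates) ∧ reorder_candidates_alt (pvRaiseWitness_reorder_candidates) = pvRaiseWitnessOut_reorder_candidates)

-- ===== LEMMAS AND PROOFS =====

theorem pv_dropWhile_digits (cs : List Char) (h : cs.all PySem.Chars.isdigit) :
    cs.dropWhile PySem.Int.isIntSpace = cs := by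
  cases cs with
  | nil => rfl
  | cons c t =>
    rw [List.dropWhile_cons_of_neg]
    have hc : PySem.Chars.isdigit c := by
      simp [List.all_cons] at h; exact h.1
    simp only [PySem.Chars.isdigit, Bool.and_eq_true, decide_eq_true_eq] at hc
    simp only [PySem.Int.isIntSpace, Bool.or_eq_true, decide_eq_true_eq, not_or]
    have h0 : ('0':Char) ≤ c := hc.1
    have h9 : c ≤ ('9':Char) := hc.2
    refine ⟨⟨⟨⟨⟨?_, ?_⟩, ?_⟩, ?_⟩, ?_⟩, ?_⟩ <;> (rintro rfl; revert h0 h9; decide)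

theorem pv_bind_cast_nonneg (o : Option Nat) :
    0 ≤ (Option.map (fun n : Int => n) (o.bind fun a => pure ((a : Int)))).getD 0 := by
  cases o <;> simp

theorem pv_isdigit_val_nonneg (s : String) (h : PySem.Str.strIsdigit s = true) :
    0 ≤ (PySem.Int.ofStr? s).getD 0 := by
  have hs : PySem.Int.ofStr? s = PySem.Int.ofChars? s.toList := by
    have h2 := PySem.Int.ofStr?_ofList s.toList
    have h3 : String.ofList s.toList = s := by simp
    rw [h3] at h2; exact h2
  rw [PySem.Str.strIsdigit_eq, PySem.Chars.strIsdigit, Bool.and_eq_true] at h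
  obtain ⟨hne, hall⟩ := h
  set cs := s.toList with hcs
  have hall' : cs.all PySem.Chars.isdigit := hall
  have hrev : cs.reverse.all PySem.Chars.isdigit := by
    rw [List.all_reverse]; exact hall'
  have h2 : ((cs.dropWhile PySem.Int.isIntSpace).reverse.dropWhile PySem.Int.isIntSpace).reverse = cs := by
    rw [pv_dropWhile_digits cs hall', pv_dropWhile_digits cs.reverse hrev, List.reverse_reverse]
  rw [hs]
  simp only [PySem.Int.ofChars?, h2]
  clear_value cs
  cases cs with
  | nil => simp at hne
  | cons c t =>
    have hc : PySem.Chars.isdigit c := by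
      simp [List.all_cons] at hall'; exact hall'.1
    simp only [PySem.Chars.isdigit, Bool.and_eq_true, decide_eq_true_eq] at hc
    split
    case _ ds heq =>
      exfalso
      rw [List.cons.injEq] at heq
      obtain ⟨rfl, -⟩ := heq
      revert hc; decide
    case _ ds heq =>
      exfalso
      rw [List.cons.injEq] at heq
      obtain ⟨rfl, -⟩ := heq
      revert hc; decide
    case _ =>
      exact pv_bind_cast_nonneg _


-- find? is the head of the filtered list
theorem pv_find?_eq_head?_filter {α : Type} (p : α → Bool) (l : List α) :
    l.find? p = (l.filter p).head? := by
  induction l with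
  | nil => rfl
  | cons x t ih =>
    by_cases hx : p x = true
    · simp [hx]
    · rw [List.find?_cons_of_neg (by simp [hx]), List.filter_cons_of_neg (by simp [hx]), ih]

-- insertBy on a key-sorted list keeps it sorted
theorem pv_insertBy_pairwise {α : Type} (key : α → Int) (x : α) (ys : List α)
    (h : ys.Pairwise (fun a b => key a ≤ key b)) :
    (PySem.List.insertBy (fun a b => decide (key a < key b)) x ys).Pairwise (fun a b => key a ≤ key b) := by
  induction ys with
  | nil => simp [PySem.List.insertBy]
  | cons y t ih =>
    rw [List.pairwise_cons] at h
    obtain ⟨hy, ht⟩ := h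
    simp only [PySem.List.insertBy]
    by_cases hlt : key x < key y
    · simp only [hlt, decide_true, if_true]
      refine List.pairwise_cons.mpr ⟨?_, List.pairwise_cons.mpr ⟨hy, ht⟩⟩
      intro z hz
      rcases List.mem_cons.mp hz with rfl | hz
      · exact le_of_lt hlt
      · exact le_trans (le_of_lt hlt) (hy z hz)
    · simp only [hlt, decide_false, Bool.false_eq_true, if_false]
      refine List.pairwise_cons.mpr ⟨?_, ih ht⟩
      intro z hz
      rw [PySem.List.mem_insertBy] at hz
      rcases hz with rfl | hz
      · exact le_of_not_gt hlt
      · exact hy z hz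

-- insertBy into a key-sorted list appends x at the end of its key group (stability kernel)
theorem pv_filter_insertBy {α : Type} (key : α → Int) (x : α) (ys : List α) (k : Int)
    (h : ys.Pairwise (fun a b => key a ≤ key b)) :
    (PySem.List.insertBy (fun a b => decide (key a < key b)) x ys).filter (fun c => key c == k)
      = ys.filter (fun c => key c == k) ++ (if key x = k then [x] else []) := by
  induction ys with
  | nil =>
    simp only [PySem.List.insertBy, List.filter_nil, List.nil_append]
    by_cases hk : key x = k
    · rw [List.filter_cons_of_pos (by simp [hk]), if_pos hk, List.filter_nil]
    · rw [List.filter_cons_of_neg (by simp [hk]), if_neg hk, List.filter_nil]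
  | cons y t ih =>
    rw [List.pairwise_cons] at h
    obtain ⟨hy, ht⟩ := h
    simp only [PySem.List.insertBy]
    by_cases hlt : key x < key y
    · simp only [hlt, decide_true, if_true]
      by_cases hk : key x = k
      · have hemp : (y :: t).filter (fun c => key c == k) = [] := by
          rw [List.filter_eq_nil_iff]
          intro z hz
          have hz' : key y ≤ key z := by
            rcases List.mem_cons.mp hz with rfl | hz2
            · exact le_refl _
            · exact hy z hz2
          simp only [beq_iff_eq]
          omega
        rw [List.filter_cons_of_pos (by simp [hk]), hemp, if_pos hk, List.nil_append]
      · rw [List.filter_cons_of_neg (by simp [hk]), if_neg hk, List.append_nil]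
    · simp only [hlt, decide_false, Bool.false_eq_true, if_false]
      by_cases hyk : key y = k
      · rw [List.filter_cons_of_pos (by simp [hyk]), List.filter_cons_of_pos (by simp [hyk]), ih ht,
          List.cons_append]
      · rw [List.filter_cons_of_neg (by simp [hyk]), List.filter_cons_of_neg (by simp [hyk]), ih ht]

-- STABILITY: sorting does not change the subsequence of any fixed key
theorem pv_filter_sorted {α : Type} (key : α → Int) (xs : List α) (k : Int) :
    (PySem.List.sorted xs key false).filter (fun c => key c == k) = xs.filter (fun c => key c == k) := by
  rw [PySem.List.sorted_eq_foldl_insertBy]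
  suffices h : ∀ (acc : List α),
      acc.Pairwise (fun a b => key a ≤ key b) →
      (xs.foldl (fun acc x => PySem.List.insertBy (fun a b => decide (key a < key b)) x acc) acc).filter
          (fun c => key c == k)
        = acc.filter (fun c => key c == k) ++ xs.filter (fun c => key c == k) by
    simpa using h [] (by simp)
  induction xs with
  | nil => intro acc _; simp
  | cons x t ih =>
    intro acc hacc
    simp only [List.foldl_cons]
    rw [ih _ (pv_insertBy_pairwise key x acc hacc), pv_filter_insertBy key x acc k hacc]
    by_cases hk : key x = k
    · rw [List.filter_cons_of_pos (by simp [hk]), if_pos hk]; simp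
    · rw [List.filter_cons_of_neg (by simp [hk]), if_neg hk]; simp

theorem pv_find?_sorted {α : Type} (key : α → Int) (xs : List α) (k : Int) :
    (PySem.List.sorted xs key false).find? (fun c => key c == k) = xs.find? (fun c => key c == k) := by
  rw [pv_find?_eq_head?_filter, pv_find?_eq_head?_filter, pv_filter_sorted]

-- a setdefault loop is a first-wins lookup
theorem pv_get?_foldl_setdefault {ν : Type} (key : ν → Int) (l : List ν) :
    ∀ (d : PySem.Dict Int ν) (i : Int),
    (l.foldl (fun d c => d.setdefault (key c) c) d).get? i
      = (d.get? i).or (l.find? (fun c => key c == i)) := by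
  induction l with
  | nil => intro d i; simp
  | cons c t ih =>
    intro d i
    simp only [List.foldl_cons]
    rw [ih]
    by_cases hk : key c = i
    · subst hk
      rw [PySem.Dict.get?_setdefault_self, List.find?_cons_of_pos (by simp)]
      cases h : d.get? (key c) <;> simp [Option.or]
    · rw [PySem.Dict.get?_setdefault_of_ne _ _ (Ne.symm hk), List.find?_cons_of_neg (by simp [hk])]

-- A's placement loop realises the first-wins map in the array
theorem pv_place_fold {α : Type} (val : α → Int) (L : Int) (l : List α) :
    ∀ (arr : List (Option α)) (used : PySem.Set Int) (f : Int → Option α),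
    arr.length = L.toNat →
    (∀ c ∈ l, 1 ≤ val c ∧ val c ≤ L) →
    (∀ i : Int, 0 ≤ i → i < L → PySem.List.pyGetD arr i none = f i) →
    (∀ i : Int, i ∈ used ↔ (0 ≤ i ∧ i < L ∧ f i ≠ none)) →
    ∀ i : Int, 0 ≤ i → i < L →
      PySem.List.pyGetD
        (l.foldl (fun s c =>
          if 0 ≤ val c - 1 ∧ val c - 1 < L ∧ val c - 1 ∉ s.2 then
            (PySem.List.pySetD s.1 (val c - 1) (some c), PySem.Set.add s.2 (val c - 1))
          else s) (arr, used)).1 i none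
      = (f i).or (l.find? (fun c => val c - 1 == i)) := by
  induction l with
  | nil =>
    intro arr used f hlen hb hget hused i h0 hL
    simp only [List.foldl_nil, List.find?_nil]
    rw [hget i h0 hL]
    cases f i <;> simp [Option.or]
  | cons c t ih =>
    intro arr used f hlen hb hget hused i h0 hL
    have hc := hb c (List.mem_cons_self ..)
    have hidx0 : (0:Int) ≤ val c - 1 := by omega
    have hidxL : val c - 1 < L := by omega
    simp only [List.foldl_cons]
    by_cases hmem : val c - 1 ∈ used
    · have hf : f (val c - 1) ≠ none := ((hused _).mp hmem).2.2
      rw [if_neg (by tauto)]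
      rw [ih arr used f hlen (fun x hx => hb x (List.mem_cons_of_mem _ hx)) hget hused i h0 hL]
      by_cases hiq : val c - 1 = i
      · subst hiq
        rw [List.find?_cons_of_pos (by simp)]
        cases hfe : f (val c - 1) with
        | none => exact absurd hfe hf
        | some a => simp [Option.or]
      · rw [List.find?_cons_of_neg (by simp [hiq])]
    · have hf : f (val c - 1) = none := by
        by_contra hne
        exact hmem ((hused _).mpr ⟨hidx0, hidxL, hne⟩)
      rw [if_pos ⟨hidx0, hidxL, hmem⟩]
      have hkey : ∀ j : Int, 0 ≤ j →
          PySem.List.pyGetD (PySem.List.pySetD arr (val c - 1) (some c)) j none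
            = if j = val c - 1 then some c else PySem.List.pyGetD arr j none := by
        intro j hj0
        have h1 := PySem.List.pyGetD_pySetD_natCast arr (val c - 1).toNat j.toNat (some c) none
          (by omega)
        rw [Int.toNat_of_nonneg hidx0, Int.toNat_of_nonneg hj0] at h1
        rw [h1]
        by_cases heq : j = val c - 1
        · rw [if_pos (by omega), if_pos heq]
        · rw [if_neg (by omega), if_neg heq]
      have harrlen : (PySem.List.pySetD arr (val c - 1) (some c)).length = L.toNat := by
        rw [PySem.List.length_pySetD]; exact hlen
      have hget' : ∀ j : Int, 0 ≤ j → j < L →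
          PySem.List.pyGetD (PySem.List.pySetD arr (val c - 1) (some c)) j none
            = (fun j => if j = val c - 1 then some c else f j) j := by
        intro j hj0 hjL
        rw [hkey j hj0]
        simp only
        by_cases heq : j = val c - 1
        · rw [if_pos heq, if_pos heq]
        · rw [if_neg heq, if_neg heq, hget j hj0 hjL]
      have hused' : ∀ j : Int, j ∈ PySem.Set.add used (val c - 1) ↔
          (0 ≤ j ∧ j < L ∧ (fun j => if j = val c - 1 then some c else f j) j ≠ none) := by
        intro j
        rw [PySem.Set.mem_add]
        simp only
        constructor
        · rintro (hj | rfl)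
          · have hh := (hused j).mp hj
            refine ⟨hh.1, hh.2.1, ?_⟩
            split_ifs with hq
            · simp
            · exact hh.2.2
          · exact ⟨hidx0, hidxL, by simp⟩
        · rintro ⟨hj0, hjL, hne⟩
          by_cases hq : j = val c - 1
          · right; exact hq
          · left; exact (hused j).mpr ⟨hj0, hjL, by rw [if_neg hq] at hne; exact hne⟩
      rw [ih _ _ _ harrlen (fun x hx => hb x (List.mem_cons_of_mem _ hx)) hget' hused' i h0 hL]
      by_cases hiq : val c - 1 = i
      · subst hiq
        rw [List.find?_cons_of_pos (by simp), if_pos rfl, hf]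
        simp [Option.or]
      · rw [List.find?_cons_of_neg (by simp [hiq]), if_neg (by omega)]

-- the placement loop never changes the array length
theorem pv_place_length {α : Type} (val : α → Int) (L : Int) (l : List α) :
    ∀ (arr : List (Option α)) (used : PySem.Set Int),
    (l.foldl (fun s c =>
        if 0 ≤ val c - 1 ∧ val c - 1 < L ∧ val c - 1 ∉ s.2 then
          (PySem.List.pySetD s.1 (val c - 1) (some c), PySem.Set.add s.2 (val c - 1))
        else s) (arr, used)).1.length = arr.length := by
  induction l with
  | nil => intro arr used; rfl
  | cons c t ih =>
    intro arr used
    simp only [List.foldl_cons]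
    split_ifs with hcond
    · rw [ih, PySem.List.length_pySetD]
    · exact ih arr used

-- B's output loop only appends: pull the accumulator out front
theorem pv_stream_accum {α : Type} (g : Int → Option α) (dflt : α) (nd : List α) (l : List Int) :
    ∀ (out : List α) (cur : Int),
    l.foldl (fun s i =>
        if (g i).isSome then (s.1 ++ [(g i).getD dflt], s.2)
        else if s.2 < (nd.length : Int) then (s.1 ++ [PySem.List.pyGetD nd s.2 dflt], s.2 + 1)
        else s) (out, cur)
    = (out ++ (l.foldl (fun s i =>
        if (g i).isSome then (s.1 ++ [(g i).getD dflt], s.2)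
        else if s.2 < (nd.length : Int) then (s.1 ++ [PySem.List.pyGetD nd s.2 dflt], s.2 + 1)
        else s) ([], cur)).1,
       (l.foldl (fun s i =>
        if (g i).isSome then (s.1 ++ [(g i).getD dflt], s.2)
        else if s.2 < (nd.length : Int) then (s.1 ++ [PySem.List.pyGetD nd s.2 dflt], s.2 + 1)
        else s) ([], cur)).2) := by
  induction l with
  | nil => intro out cur; simp
  | cons i t ih =>
    intro out cur
    simp only [List.foldl_cons]
    by_cases hg : (g i).isSome
    · simp only [hg, if_true, List.nil_append]
      rw [ih (out ++ [(g i).getD dflt]) cur, ih [(g i).getD dflt] cur]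
      simp
    · simp only [hg, Bool.false_eq_true, if_false]
      by_cases hc : cur < (nd.length : Int)
      · simp only [hc, if_true, List.nil_append]
        rw [ih (out ++ [PySem.List.pyGetD nd cur dflt]) (cur + 1), ih [PySem.List.pyGetD nd cur dflt] (cur + 1)]
        simp
      · simp only [hc, if_false]
        exact ih out cur

-- Dict.contains is definedness of Dict.get?
theorem pv_dict_contains {ν : Type} (d : PySem.Dict Int ν) (k : Int) :
    d.contains k = (d.get? k).isSome := by
  simp only [PySem.Dict.contains, PySem.Dict.get?, Option.isSome_map]
  rw [Bool.eq_iff_iff, List.any_eq_true, List.find?_isSome]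

-- CORE: A's None-fill pass followed by the None filter equals B's streaming output pass
theorem pv_fill_stream {α : Type} (g : Int → Option α) (dflt : α) (nd : List α) (L : Int)
    (accum : ∀ (l : List Int) (out : List α) (cur : Int),
      l.foldl (fun s i =>
          if (g i).isSome then (s.1 ++ [(g i).getD dflt], s.2)
          else if s.2 < (nd.length : Int) then (s.1 ++ [PySem.List.pyGetD nd s.2 dflt], s.2 + 1)
          else s) (out, cur)
      = (out ++ (l.foldl (fun s i =>
          if (g i).isSome then (s.1 ++ [(g i).getD dflt], s.2)
          else if s.2 < (nd.length : Int) then (s.1 ++ [PySem.List.pyGetD nd s.2 dflt], s.2 + 1)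
          else s) ([], cur)).1,
         (l.foldl (fun s i =>
          if (g i).isSome then (s.1 ++ [(g i).getD dflt], s.2)
          else if s.2 < (nd.length : Int) then (s.1 ++ [PySem.List.pyGetD nd s.2 dflt], s.2 + 1)
          else s) ([], cur)).2)) :
    ∀ (n : Nat) (k : Int) (arr : List (Option α)) (cur : Int),
    0 ≤ k → k ≤ L → (L - k).toNat = n → arr.length = L.toNat →
    (∀ i : Int, k ≤ i → i < L → PySem.List.pyGetD arr i none = g i) →
    ((PySem.List.pyRange k L 1).foldl (fun s i =>
        if PySem.List.pyGetD s.1 i none = none ∧ s.2 < (nd.length : Int) then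
          (PySem.List.pySetD s.1 i (some (PySem.List.pyGetD nd s.2 dflt)), s.2 + 1)
        else s) (arr, cur)).1.filterMap id
    = (arr.take k.toNat).filterMap id ++
      ((PySem.List.pyRange k L 1).foldl (fun s i =>
        if (g i).isSome then (s.1 ++ [(g i).getD dflt], s.2)
        else if s.2 < (nd.length : Int) then (s.1 ++ [PySem.List.pyGetD nd s.2 dflt], s.2 + 1)
        else s) ([], cur)).1 := by
  intro n
  induction n with
  | zero =>
    intro k arr cur hk0 hkL hn hlen hget
    have hkL' : L ≤ k := by omega
    rw [PySem.List.pyRange_one_eq_nil hkL']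
    simp only [List.foldl_nil]
    rw [List.take_of_length_le (by omega), List.append_nil]
  | succ n ih =>
    intro k arr cur hk0 hkL hn hlen hget
    have hklt : k < L := by omega
    rw [PySem.List.pyRange_one_cons hklt]
    simp only [List.foldl_cons]
    have hL0 : 0 ≤ L := by omega
    have hkarr : PySem.List.pyGetD arr k none = arr[k.toNat]'(by omega) :=
      PySem.List.pyGetD_eq_getElem arr none hk0 (by omega)
    have hkg : PySem.List.pyGetD arr k none = g k := hget k le_rfl hklt
    have htake : arr.take (k + 1).toNat = arr.take k.toNat ++ [arr[k.toNat]'(by omega)] := by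
      have h1 : (k+1).toNat = k.toNat + 1 := by omega
      rw [h1, List.take_add_one, List.getElem?_eq_getElem (by omega)]
      rfl
    by_cases hg : (g k).isSome
    · obtain ⟨a, ha⟩ := Option.isSome_iff_exists.mp hg
      rw [if_neg (by rw [hkg, ha]; simp), if_pos hg]
      rw [ih (k+1) arr cur (by omega) (by omega) (by omega) hlen
        (fun i hi hiL => hget i (by omega) hiL)]
      simp only [List.nil_append]
      rw [accum _ [(g k).getD dflt] cur]
      rw [htake]
      simp only [List.filterMap_append]
      rw [← hkarr, hkg, ha]
      simp [List.append_assoc]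
    · have hgnone : g k = none := Option.not_isSome_iff_eq_none.mp hg
      rw [if_neg hg]
      by_cases hc : cur < (nd.length : Int)
      · rw [if_pos ⟨by rw [hkg, hgnone], hc⟩, if_pos hc]
        set v := PySem.List.pyGetD nd cur dflt with hv
        have hset : PySem.List.pySetD arr k (some v) = arr.set k.toNat (some v) :=
          PySem.List.pySetD_of_nonneg arr (some v) hk0
        have hlen' : (PySem.List.pySetD arr k (some v)).length = L.toNat := by
          rw [PySem.List.length_pySetD]; exact hlen
        have hget' : ∀ i : Int, k + 1 ≤ i → i < L →
            PySem.List.pyGetD (PySem.List.pySetD arr k (some v)) i none = g i := by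
          intro i hi hiL
          have h1 := PySem.List.pyGetD_pySetD_natCast arr k.toNat i.toNat (some v) none (by omega)
          rw [Int.toNat_of_nonneg hk0, Int.toNat_of_nonneg (by omega : (0:Int) ≤ i)] at h1
          rw [h1, if_neg (by omega)]
          exact hget i (by omega) hiL
        rw [ih (k+1) _ (cur+1) (by omega) (by omega) (by omega) hlen' hget']
        simp only [List.nil_append]
        rw [accum _ [v] (cur+1)]
        have htake' : (PySem.List.pySetD arr k (some v)).take (k + 1).toNat
            = arr.take k.toNat ++ [some v] := by
          have h1 : (k+1).toNat = k.toNat + 1 := by omega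
          rw [hset, h1, List.take_add_one, List.getElem?_set_self (by omega), List.take_set,
            List.set_eq_of_length_le (by rw [List.length_take]; omega)]
          rfl
        rw [htake']
        simp [List.filterMap_append, List.append_assoc]
      · rw [if_neg (by intro hh; exact hc hh.2), if_neg hc]
        rw [ih (k+1) arr cur (by omega) (by omega) (by omega) hlen
          (fun i hi hiL => hget i (by omega) hiL)]
        rw [htake]
        simp only [List.filterMap_append]
        rw [← hkarr, hkg, hgnone]
        simp

-- ===== VERDICT (by name: the statement is the Claim_ definition above) =====
theorem reorder_candidates_spec : Claim_equal_reorder_candidates := by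
  intro cs _hdom hpre
  unfold Spec_reorder_candidates reorder_candidates reorder_candidates_alt
  simp only [PySem.List.foldl_if_add_one, zero_add]
  by_cases h4 : ((cs.countP (pvDig "text") : Int) < 4 ∧ (cs.countP (pvDig "content-desc") : Int) < 4)
  · rw [if_pos h4, if_pos h4]
  · rw [if_neg h4, if_neg h4]
    -- extract the existence of a nonzero digit candidate from Pre_
    have hex0 : ∃ c ∈ cs,
        pvDig (if 4 ≤ cs.countP (pvDig "text") then "text" else "content-desc") c = true ∧
        pvVal (if 4 ≤ cs.countP (pvDig "text") then "text" else "content-desc") c ≠ 0 := by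
      unfold Pre_reorder_candidates at hpre
      rcases hpre with h1 | hex
      · exact absurd (by omega : ((cs.countP (pvDig "text") : Int) < 4 ∧ (cs.countP (pvDig "content-desc") : Int) < 4)) h4
      · exact hex
    -- align the two spellings of the attribute choice and generalize it
    have hattr : (if ((cs.countP (pvDig "text") : Int)) ≥ 4 then "text" else "content-desc")
        = (if 4 ≤ cs.countP (pvDig "text") then "text" else "content-desc") := by
      split_ifs with hh1 hh2 hh2 <;> first | rfl | omega
    rw [hattr]
    generalize hA : (if 4 ≤ cs.countP (pvDig "text") then "text" else "content-desc") = attr at hex0 ⊢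
    obtain ⟨c0, hc0mem, hc0dig, hc0val⟩ := hex0
    -- decompose A's three-accumulator classification loop
    have hAfun : (fun (s : List (List (String × String)) × List (List (String × String)) × List (List (String × String))) (c : List (String × String)) =>
        if pvDig attr c = true then
          if pvVal attr c = 0 then (s.1, s.2.1, s.2.2 ++ [c]) else (s.1 ++ [c], s.2.1, s.2.2)
        else (s.1, s.2.1 ++ [c], s.2.2))
      = (fun s c =>
          ((if pvDig attr c = true ∧ ¬ pvVal attr c = 0 then s.1 ++ [c] else s.1),
           (if ¬ pvDig attr c = true then s.2.1 ++ [c] else s.2.1),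
           (if pvDig attr c = true ∧ pvVal attr c = 0 then s.2.2 ++ [c] else s.2.2))) := by
      funext s c
      by_cases h1 : pvDig attr c = true
      · by_cases h2 : pvVal attr c = 0 <;> simp [h1, h2]
      · simp [h1]
    rw [hAfun]
    rw [PySem.List.foldl_prod_mk
      (f := fun a c => if pvDig attr c = true ∧ ¬ pvVal attr c = 0 then a ++ [c] else a)
      (g := fun (b : List (List (String × String)) × List (List (String × String))) c =>
        ((if ¬ pvDig attr c = true then b.1 ++ [c] else b.1),
         (if pvDig attr c = true ∧ pvVal attr c = 0 then b.2 ++ [c] else b.2)))]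
    rw [PySem.List.foldl_prod_mk
      (f := fun a c => if ¬ pvDig attr c = true then a ++ [c] else a)
      (g := fun b c => if pvDig attr c = true ∧ pvVal attr c = 0 then b ++ [c] else b)]
    -- decompose B's four-accumulator loop
    have hBfun : (fun (s : PySem.Dict Int (List (String × String)) × List (List (String × String)) × List (List (String × String)) × Int) (c : List (String × String)) =>
        if pvDig attr c = true then
          if pvVal attr c = 0 then (s.1, s.2.1, s.2.2.1 ++ [c], s.2.2.2)
          else (s.1.setdefault (pvVal attr c - 1) c, s.2.1, s.2.2.1,
                if pvVal attr c > s.2.2.2 then pvVal attr c else s.2.2.2)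
        else (s.1, s.2.1 ++ [c], s.2.2.1, s.2.2.2))
      = (fun s c =>
          ((if pvDig attr c = true ∧ ¬ pvVal attr c = 0 then s.1.setdefault (pvVal attr c - 1) c else s.1),
           (if ¬ pvDig attr c = true then s.2.1 ++ [c] else s.2.1),
           (if pvDig attr c = true ∧ pvVal attr c = 0 then s.2.2.1 ++ [c] else s.2.2.1),
           (if pvDig attr c = true ∧ ¬ pvVal attr c = 0 then max s.2.2.2 (pvVal attr c) else s.2.2.2))) := by
      funext s c
      by_cases h1 : pvDig attr c = true
      · by_cases h2 : pvVal attr c = 0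
        · simp [h1, h2]
        · simp only [h1, h2, true_and, not_false_iff, if_true, if_false, not_true]
          refine Prod.ext rfl (Prod.ext rfl (Prod.ext rfl ?_))
          simp only
          split_ifs <;> omega
      · simp [h1]
    rw [hBfun]
    rw [PySem.List.foldl_prod_mk
      (f := fun (d : PySem.Dict Int (List (String × String))) c =>
        if pvDig attr c = true ∧ ¬ pvVal attr c = 0 then d.setdefault (pvVal attr c - 1) c else d)
      (g := fun (b : List (List (String × String)) × List (List (String × String)) × Int) c =>
        ((if ¬ pvDig attr c = true then b.1 ++ [c] else b.1),
         (if pvDig attr c = true ∧ pvVal attr c = 0 then b.2.1 ++ [c] else b.2.1),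
         (if pvDig attr c = true ∧ ¬ pvVal attr c = 0 then max b.2.2 (pvVal attr c) else b.2.2)))]
    rw [PySem.List.foldl_prod_mk
      (f := fun a c => if ¬ pvDig attr c = true then a ++ [c] else a)
      (g := fun (b : List (List (String × String)) × Int) c =>
        ((if pvDig attr c = true ∧ pvVal attr c = 0 then b.1 ++ [c] else b.1),
         (if pvDig attr c = true ∧ ¬ pvVal attr c = 0 then max b.2 (pvVal attr c) else b.2)))]
    rw [PySem.List.foldl_prod_mk
      (f := fun a c => if pvDig attr c = true ∧ pvVal attr c = 0 then a ++ [c] else a)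
      (g := fun b c => if pvDig attr c = true ∧ ¬ pvVal attr c = 0 then max b (pvVal attr c) else b)]
    simp only [PySem.List.foldl_append_ite_eq_filter, List.nil_append]
    rw [PySem.List.foldl_ite_eq_foldl_filter
      (fun c => pvDig attr c = true ∧ ¬ pvVal attr c = 0)
      (fun (d : PySem.Dict Int (List (String × String))) c => d.setdefault (pvVal attr c - 1) c)]
    rw [PySem.List.foldl_ite_eq_foldl_filter
      (fun c => pvDig attr c = true ∧ ¬ pvVal attr c = 0)
      (fun b c => max b (pvVal attr c))]
    set ds := cs.filter (fun x => decide (pvDig attr x = true ∧ ¬ pvVal attr x = 0)) with hds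
    set nd := cs.filter (fun x => decide (¬ pvDig attr x = true)) with hnd
    set zs := cs.filter (fun x => decide (pvDig attr x = true ∧ pvVal attr x = 0)) with hzs
    set M := ds.foldl (fun b c => max b (pvVal attr c)) 0 with hM
    have hc0ds : c0 ∈ ds := by
      rw [hds, List.mem_filter]
      exact ⟨hc0mem, by simp [hc0dig, hc0val]⟩
    have hval1 : ∀ c ∈ ds, 1 ≤ pvVal attr c := by
      intro c hc
      rw [hds, List.mem_filter] at hc
      have hp := of_decide_eq_true hc.2
      have h0 := pv_isdigit_val_nonneg (PySem.Dict.getD ⟨c⟩ attr "") hp.1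
      unfold pvVal
      unfold pvVal at hp
      omega
    have hub : ∀ c ∈ ds, pvVal attr c ≤ M := (PySem.List.le_foldl_max_int ds (pvVal attr) 0).2
    have hM1 : 1 ≤ M := le_trans (hval1 c0 hc0ds) (hub c0 hc0ds)
    have hMfold : M = (ds.map (pvVal attr)).foldl max 0 := by
      rw [List.foldl_map]
    have hMmem : M ∈ ds.map (pvVal attr) := by
      rcases PySem.List.foldl_max_mem (ds.map (pvVal attr)) 0 with h | h
      · rw [← hMfold] at h; omega
      · rw [← hMfold] at h; exact h
    -- A's max over the sorted digit list equals B's running max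
    have hvM : (PySem.List.max? (List.map (pvVal attr) (PySem.List.sorted ds (pvVal attr))) (fun v => v)).getD 0 = M := by
      cases hmax : PySem.List.max? (List.map (pvVal attr) (PySem.List.sorted ds (pvVal attr))) (fun v => v) with
      | none =>
        rw [PySem.List.max?_eq_none_iff, List.map_eq_nil_iff, PySem.List.sorted_eq_nil_iff] at hmax
        rw [hmax] at hc0ds
        exact absurd hc0ds (List.not_mem_nil)
      | some m =>
        have hmem := PySem.List.max?_mem hmax
        obtain ⟨x, hx, hxm⟩ := List.mem_map.mp hmem
        rw [PySem.List.mem_sorted] at hx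
        have h1 : m ≤ M := hxm ▸ hub x hx
        have h2 : M ≤ m := by
          obtain ⟨y, hy, hyM⟩ := List.mem_map.mp hMmem
          have hyin : pvVal attr y ∈ List.map (pvVal attr) (PySem.List.sorted ds (pvVal attr)) :=
            List.mem_map.mpr ⟨y, (PySem.List.mem_sorted ds (pvVal attr) false y).mpr hy, rfl⟩
          have := PySem.List.max?_isMax hmax _ hyin
          simp only at this
          omega
        simp only [Option.getD_some]
        omega
    rw [hvM, show M - 1 + 1 = M by omega]
    set L := max (cs.length : Int) M with hL
    have hL1 : 1 ≤ L := le_trans hM1 (le_max_right _ _)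
    -- A's placement pass realises the first-wins map
    have hbound : ∀ c ∈ PySem.List.sorted ds (pvVal attr), 1 ≤ pvVal attr c ∧ pvVal attr c ≤ L := by
      intro c hc
      rw [PySem.List.mem_sorted] at hc
      exact ⟨hval1 c hc, le_trans (hub c hc) (le_max_right _ _)⟩
    have hget0 : ∀ i : Int, 0 ≤ i → i < L →
        PySem.List.pyGetD (List.replicate L.toNat (none : Option (List (String × String)))) i none = none := by
      intro i h0 hl
      rw [PySem.List.pyGetD_eq_getElem _ _ h0 (by simp; omega)]
      simp
    have hused0 : ∀ i : Int, i ∈ (PySem.Set.empty : PySem.Set Int) ↔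
        (0 ≤ i ∧ i < L ∧ (fun _ : Int => (none : Option (List (String × String)))) i ≠ none) := by
      intro i
      simp [PySem.Set.empty]
    have hplace := pv_place_fold (pvVal attr) L (PySem.List.sorted ds (pvVal attr))
      (List.replicate L.toNat none) PySem.Set.empty (fun _ => none)
      (by simp) hbound hget0 hused0
    -- stability: first-wins over the sorted list = first-wins over the original order
    have hfind : ∀ i : Int, (PySem.List.sorted ds (pvVal attr)).find? (fun c => pvVal attr c - 1 == i)
        = ds.find? (fun c => pvVal attr c - 1 == i) := by
      intro i
      have hp : (fun c : List (String × String) => pvVal attr c - 1 == i) = (fun c => pvVal attr c == i + 1) := by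
        funext c
        rw [Bool.eq_iff_iff]
        simp only [beq_iff_eq]
        omega
      rw [hp]
      exact pv_find?_sorted (pvVal attr) ds (i + 1)
    have hg0 : ∀ i : Int, 0 ≤ i → i < L →
        PySem.List.pyGetD
          ((PySem.List.sorted ds (pvVal attr)).foldl (fun s c =>
            if 0 ≤ pvVal attr c - 1 ∧ pvVal attr c - 1 < L ∧ pvVal attr c - 1 ∉ s.2 then
              (PySem.List.pySetD s.1 (pvVal attr c - 1) (some c), PySem.Set.add s.2 (pvVal attr c - 1))
            else s) (List.replicate L.toNat none, PySem.Set.empty)).1 i none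
          = ds.find? (fun c => pvVal attr c - 1 == i) := by
      intro i h0 hl
      rw [hplace i h0 hl, Option.none_or, hfind i]
    -- B's slot dictionary is the same first-wins map
    have hslot : ∀ i : Int, (ds.foldl (fun d c => d.setdefault (pvVal attr c - 1) c) PySem.Dict.empty).get? i
        = ds.find? (fun c => pvVal attr c - 1 == i) := by
      intro i
      have h := pv_get?_foldl_setdefault (fun c => pvVal attr c - 1) ds PySem.Dict.empty i
      simpa [PySem.Dict.empty, PySem.Dict.get?] using h
    have hstream : (fun (s : List (List (String × String)) × Int) (i : Int) =>
        if (ds.foldl (fun d c => d.setdefault (pvVal attr c - 1) c) PySem.Dict.empty).contains i = true then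
          (s.1 ++ [(ds.foldl (fun d c => d.setdefault (pvVal attr c - 1) c) PySem.Dict.empty).getD i []], s.2)
        else if s.2 < (nd.length : Int) then (s.1 ++ [PySem.List.pyGetD nd s.2 []], s.2 + 1) else s)
      = (fun s i =>
          if (ds.find? (fun c => pvVal attr c - 1 == i)).isSome then
            (s.1 ++ [(ds.find? (fun c => pvVal attr c - 1 == i)).getD []], s.2)
          else if s.2 < (nd.length : Int) then (s.1 ++ [PySem.List.pyGetD nd s.2 []], s.2 + 1) else s) := by
      funext s i
      rw [pv_dict_contains, hslot i]
      simp only [PySem.Dict.getD, hslot i]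
    rw [hstream]
    -- A's fill pass + None filter = B's stream pass
    have hlenst := pv_place_length (pvVal attr) L (PySem.List.sorted ds (pvVal attr))
      (List.replicate L.toNat (none : Option (List (String × String)))) PySem.Set.empty
    rw [List.length_replicate] at hlenst
    have hfill := pv_fill_stream (fun i => ds.find? (fun c => pvVal attr c - 1 == i)) [] nd L
      (pv_stream_accum _ [] nd) ((L - 0).toNat) 0 _ 0 le_rfl (by omega) rfl hlenst hg0
    rw [List.filterMap_append, hfill]
    simp [List.filterMap_map]

@[simp]
theorem reorder_candidates_raises : Claim_raises_reorder_candidates := by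
  unfold Claim_raises_reorder_candidates
  refine ⟨?_, by decide, by decide, by decide⟩
  intro cs _ hr hpre
  unfold Raises_reorder_candidates at hr
  unfold Pre_reorder_candidates at hpre
  rcases hpre with h1 | ⟨c, hc, hdig, hval⟩
  · exact hr.1 h1
  · exact hval (hr.2 c hc hdig)
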